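-- pv_equiv track=rewrite | github.com/AnverGadzhiev/CF_solutions | 12_11_2022/piles/piles.py | determWinner
-- ===== SOURCE A (Python) =====
-- def determWinner(t, piles):
--     win_positinos = ['L']
--     for pile in reversed(piles):
--         if pile > 1: win_positinos.append('W')
--         else :
--             if win_positinos[-1] == 'L' : win_positinos.append('W')
--             else : win_positinos.append('L')
--     return 'First' if win_positinos[-1] == 'W' else 'Second'
-- ===== SOURCE B (Python) =====
-- def determWinner(t, piles):
--     n = len(piles)
--     k = 0
--     while k < n and piles[k] <= 1:
--         k += 1
--     if k < n:
--         return 'First' if k % 2 == 0 else 'Second'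
--     return 'First' if n % 2 == 1 else 'Second'
-- ===== Notes on version B (the rewrite author's own statement) =====
-- stated objective: simpler
-- what changed: Replaced A's backwards-scanning W/L list automaton with a single forward scan counting the leading run of piles <= 1 and a closed-form parity decision on that count.
import Mathlib
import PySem

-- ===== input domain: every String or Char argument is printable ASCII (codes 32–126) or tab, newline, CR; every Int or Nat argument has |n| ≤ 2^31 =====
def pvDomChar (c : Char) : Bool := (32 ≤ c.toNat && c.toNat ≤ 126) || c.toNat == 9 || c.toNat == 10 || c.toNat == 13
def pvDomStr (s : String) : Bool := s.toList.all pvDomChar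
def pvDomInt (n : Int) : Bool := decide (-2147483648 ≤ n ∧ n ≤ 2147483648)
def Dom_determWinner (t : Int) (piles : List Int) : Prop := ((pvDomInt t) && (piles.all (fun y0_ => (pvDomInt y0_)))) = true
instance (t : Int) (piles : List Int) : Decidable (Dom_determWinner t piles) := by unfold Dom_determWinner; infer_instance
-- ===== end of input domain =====

-- B replaces A's backwards W/L-list automaton by a closed-form parity decision on
-- the leading run of piles ≤ 1 (objective: simpler).

-- ===== PORT A =====
-- one step of A's loop body: append 'W' or 'L' depending on pile and the list's last entry
def pvStepA (acc : List String) (pile : Int) : List String :=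
  if pile > 1 then acc ++ ["W"]
  else if PySem.List.pyGet? acc (-1) = some "L" then acc ++ ["W"]
  else acc ++ ["L"]

def determWinner (t : Int) (piles : List Int) : String :=
  let win_positinos := piles.reverse.foldl pvStepA ["L"]
  if PySem.List.pyGet? win_positinos (-1) = some "W" then "First" else "Second"

-- ===== PORT B =====
-- the while loop of Source B: count leading piles ≤ 1
def pvLead (piles : List Int) : Nat :=
  match piles with
  | [] => 0
  | p :: rest => if p ≤ 1 then pvLead rest + 1 else 0

def determWinner_alt (t : Int) (piles : List Int) : String :=
  let n := piles.length
  let k := pvLead piles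
  if k < n then (if k % 2 = 0 then "First" else "Second")
  else (if n % 2 = 1 then "First" else "Second")

-- ===== PRECONDITION & SPEC =====
def Spec_determWinner (t : Int) (piles : List Int) (out : String) : Prop := out = determWinner_alt t piles
instance (t : Int) (piles : List Int) (out : String) : Decidable (Spec_determWinner t piles out) := by unfold Spec_determWinner; infer_instance

-- ===== CLAIM (what is proved, stated in full; the proofs are below) =====
def Claim_equal_determWinner : Prop := ∀ (t : Int) (piles : List Int), Dom_determWinner t piles → Spec_determWinner t piles (determWinner t piles)

-- ===== LEMMAS AND PROOFS =====

-- A's automaton read from the front of the list (A processes reversed piles,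
-- so the last label it appends is determined by this front-first recursion)
def pvG (piles : List Int) : String :=
  match piles with
  | [] => "L"
  | p :: rest => if p > 1 then "W" else if pvG rest = "L" then "W" else "L"

theorem pvFold_last (piles : List Int) :
    PySem.List.pyGet? (piles.reverse.foldl pvStepA ["L"]) (-1) = some (pvG piles) := by
  induction piles with
  | nil =>
    rw [List.reverse_nil, List.foldl_nil, PySem.List.pyGet?_neg_one]
    rfl
  | cons p rest ih =>
    rw [List.reverse_cons, List.foldl_append, List.foldl_cons, List.foldl_nil]
    generalize hacc : List.foldl pvStepA ["L"] rest.reverse = acc at ih ⊢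
    simp only [pvStepA, pvG]
    rw [ih]
    split_ifs <;> simp_all

theorem pvG_eq (piles : List Int) :
    pvG piles =
      (if pvLead piles < piles.length then (if pvLead piles % 2 = 0 then "W" else "L")
       else (if piles.length % 2 = 1 then "W" else "L")) := by
  induction piles with
  | nil => rfl
  | cons p rest ih =>
    simp only [pvG, pvLead, List.length_cons]
    by_cases h : p ≤ 1
    · have hnp : ¬ p > 1 := by omega
      simp only [hnp, if_false, h, if_true, ih]
      by_cases hk : pvLead rest < rest.length
      · have hk1 : pvLead rest + 1 < rest.length + 1 := by omega
        simp only [hk, if_true, hk1]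
        by_cases hm : pvLead rest % 2 = 0
        · have hm1 : ¬ ((pvLead rest + 1) % 2 = 0) := by omega
          simp [hm, hm1]
        · have hm1 : (pvLead rest + 1) % 2 = 0 := by omega
          simp [hm, hm1]
      · have hk1 : ¬ (pvLead rest + 1 < rest.length + 1) := by omega
        simp only [hk, if_false, hk1]
        by_cases hm : rest.length % 2 = 1
        · have hm1 : ¬ ((rest.length + 1) % 2 = 1) := by omega
          simp [hm, hm1]
        · have hm1 : (rest.length + 1) % 2 = 1 := by omega
          simp [hm, hm1]
    · have hp : p > 1 := by omega
      simp only [hp, if_true, h, if_false]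
      have hl : (0:Nat) < rest.length + 1 := by omega
      simp [hl]

-- ===== VERDICT (by name: the statement is the Claim_ definition above) =====
theorem determWinner_spec : Claim_equal_determWinner := by
  intro t piles _
  show (if PySem.List.pyGet? (piles.reverse.foldl pvStepA ["L"]) (-1) = some "W" then "First" else "Second")
      = (if pvLead piles < piles.length then (if pvLead piles % 2 = 0 then "First" else "Second")
         else (if piles.length % 2 = 1 then "First" else "Second"))
  rw [pvFold_last, pvG_eq]
  split_ifs <;> simp_all
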